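-- pv_equiv track=rewrite | github.com/qbasta/mag-tsp-search | src/experiments/convergence_analysis.py | get_params_for_size
-- ===== SOURCE A (Python) =====
-- def get_params_for_size(params_dict, size):
--     """
--     Zwraca parametry dla danego rozmiaru lub najbliższego dostępnego.
--
--     Args:
--         params_dict: Słownik parametrów
--         size: Rozmiar instancji
--
--     Returns:
--         Dict: Parametry dla danego rozmiaru
--     """
--     if size in params_dict:
--         return params_dict[size]
--
--     # Jeśli dokładny rozmiar nie istnieje, znajdź najbliższy
--     available_sizes = sorted(params_dict.keys())
--     if size < available_sizes[0]:
--         # Jeśli rozmiar jest mniejszy niż najmniejszy dostępny, użyj najmniejszego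
--         return params_dict[available_sizes[0]]
--
--     # Znajdź największy rozmiar, który jest mniejszy niż żądany
--     for available_size in reversed(available_sizes):
--         if available_size < size:
--             return params_dict[available_size]
--
--     # Jeśli wszystkie dostępne rozmiary są większe, użyj najmniejszego
--     return params_dict[available_sizes[0]]
-- ===== SOURCE B (Python) =====
-- def get_params_for_size(params_dict, size):
--     if size in params_dict:
--         return params_dict[size]
--     smaller = [k for k in params_dict if k < size]
--     if smaller:
--         return params_dict[max(smaller)]
--     return params_dict[min(params_dict)]
-- ===== Notes on version B (the rewrite author's own statement) =====
-- stated objective: simpler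
-- what changed: Replaces sort-then-reverse-scan (plus a separate smaller-than-minimum branch) with a single filter of the keys below size, answered by max(), falling back to min() of all keys.
import Mathlib
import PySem

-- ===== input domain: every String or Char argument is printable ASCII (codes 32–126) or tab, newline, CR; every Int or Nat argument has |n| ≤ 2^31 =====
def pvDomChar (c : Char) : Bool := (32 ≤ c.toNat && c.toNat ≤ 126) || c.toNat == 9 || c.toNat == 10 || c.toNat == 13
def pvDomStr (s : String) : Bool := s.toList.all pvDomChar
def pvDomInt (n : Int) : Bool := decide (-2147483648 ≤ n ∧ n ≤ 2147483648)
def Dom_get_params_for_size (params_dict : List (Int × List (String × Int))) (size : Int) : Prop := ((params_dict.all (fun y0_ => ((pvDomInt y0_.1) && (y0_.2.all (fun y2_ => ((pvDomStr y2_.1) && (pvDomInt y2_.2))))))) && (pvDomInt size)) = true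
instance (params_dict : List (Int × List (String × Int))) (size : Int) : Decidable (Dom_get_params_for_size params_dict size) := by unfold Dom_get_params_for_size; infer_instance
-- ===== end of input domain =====

-- B replaces A's sort + reversed scan with a one-pass filter of the keys below `size`
-- answered by max(), falling back to min(); objective: simpler.


-- ===== PORT A =====
def get_params_for_size (params_dict : List (Int × List (String × Int))) (size : Int) : List (String × Int) :=
  let d : PySem.Dict Int (List (String × Int)) := PySem.Dict.mk params_dict
  if d.contains size then d.getD size []
  else
    let available_sizes := PySem.List.sorted d.keys (fun k => k)
    match PySem.List.pyGet? available_sizes 0 with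
    | none => []   -- available_sizes[0] raises IndexError on an empty dict; excluded by Pre_
    | some a0 =>
      if size < a0 then d.getD a0 []
      else
        match available_sizes.reverse.find? (fun k => decide (k < size)) with
        | some k => d.getD k []
        | none => d.getD a0 []

-- ===== PORT B =====
def get_params_for_size_alt (params_dict : List (Int × List (String × Int))) (size : Int) : List (String × Int) :=
  let d : PySem.Dict Int (List (String × Int)) := PySem.Dict.mk params_dict
  if d.contains size then d.getD size []
  else
    let smaller := d.keys.filter (fun k => decide (k < size))
    if smaller ≠ [] then
      match PySem.List.max? smaller (fun k => k) with
      | some m => d.getD m []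
      | none => []
    else
      match PySem.List.min? d.keys (fun k => k) with
      | some m => d.getD m []
      | none => []   -- min() raises ValueError on an empty dict; excluded by Pre_

-- ===== PRECONDITION & SPEC =====
-- A raises IndexError on an empty dict (and that is the only input it raises on); excluded.
def Pre_get_params_for_size (params_dict : List (Int × List (String × Int))) (size : Int) : Prop := params_dict ≠ []
instance (params_dict : List (Int × List (String × Int))) (size : Int) : Decidable (Pre_get_params_for_size params_dict size) := by unfold Pre_get_params_for_size; infer_instance
def pvWitness_get_params_for_size : (List (Int × List (String × Int))) × Int := ([(3, [("iters", 10)])], 5)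
def Spec_get_params_for_size (params_dict : List (Int × List (String × Int))) (size : Int) (out : List (String × Int)) : Prop := out = get_params_for_size_alt params_dict size
instance (params_dict : List (Int × List (String × Int))) (size : Int) (out : List (String × Int)) : Decidable (Spec_get_params_for_size params_dict size out) := by unfold Spec_get_params_for_size; infer_instance

-- ===== CLAIM (what is proved, stated in full; the proofs are below) =====
def Claim_equal_get_params_for_size : Prop := ∀ (params_dict : List (Int × List (String × Int))) (size : Int), Dom_get_params_for_size params_dict size → Pre_get_params_for_size params_dict size → Spec_get_params_for_size params_dict size (get_params_for_size params_dict size)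

-- ===== LEMMAS AND PROOFS =====

-- on a reverse-sorted list, find? of (· < size) returns an upper bound of all elements < size
theorem find_lt_is_max (l : List Int) (hl : l.Pairwise (fun a b => b ≤ a)) (size r : Int)
    (hf : l.find? (fun k => decide (k < size)) = some r) :
    ∀ y ∈ l, y < size → y ≤ r := by
  induction l with
  | nil => simp at hf
  | cons a t ih =>
    rcases List.pairwise_cons.1 hl with ⟨ha, ht⟩
    by_cases hp : a < size
    · rw [List.find?_cons_of_pos (by simpa using hp)] at hf
      cases hf
      intro y hy _
      rcases List.mem_cons.1 hy with rfl | hy'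
      · exact le_refl _
      · exact ha y hy'
    · rw [List.find?_cons_of_neg (by simpa using hp)] at hf
      intro y hy hys
      rcases List.mem_cons.1 hy with rfl | hy'
      · exact absurd hys hp
      · exact ih ht hf y hy' hys

-- the head of the sorted key list is ≤ every key
theorem sorted_head_le (ks : List Int) (a0 : Int) (t : List Int)
    (hs : PySem.List.sorted ks (fun k => k) = a0 :: t) :
    ∀ y ∈ ks, a0 ≤ y := by
  intro y hy
  have hperm := PySem.List.sorted_perm ks (fun k => k) false
  have hy' : y ∈ PySem.List.sorted ks (fun k => k) := hperm.mem_iff.2 hy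
  rw [hs] at hy'
  have hpw := PySem.List.sorted_pairwise ks (fun k => k)
  rw [hs] at hpw
  rcases List.mem_cons.1 hy' with rfl | hy''
  · exact le_refl _
  · exact (List.pairwise_cons.1 hpw).1 y hy''

theorem get_params_for_size_spec : Claim_equal_get_params_for_size := by
  intro params_dict size _ hpre
  unfold Spec_get_params_for_size
  unfold get_params_for_size get_params_for_size_alt
  simp only []
  set d : PySem.Dict Int (List (String × Int)) := PySem.Dict.mk params_dict with hd
  by_cases hc : d.contains size = true
  · simp [hc]
  · simp only [hc, if_false, Bool.false_eq_true]
    set ks := d.keys with hks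
    have hksne : ks ≠ [] := by
      rw [hks, hd]
      simp only [PySem.Dict.keys_mk]
      simpa using hpre
    obtain ⟨a0, t, hs⟩ : ∃ a0 t, PySem.List.sorted ks (fun k => k) = a0 :: t := by
      cases h : PySem.List.sorted ks (fun k => k) with
      | nil => exact absurd ((PySem.List.sorted_eq_nil_iff ks _ false).1 h) hksne
      | cons a t => exact ⟨a, t, rfl⟩
    rw [hs]
    have hget : PySem.List.pyGet? (a0 :: t) 0 = some a0 := by
      simp [PySem.List.pyGet?, PySem.List.pyIdx?]
    rw [hget]
    have hperm : (a0 :: t).Perm ks := hs ▸ PySem.List.sorted_perm ks (fun k => k) false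
    have ha0mem : a0 ∈ ks := hperm.mem_iff.1 (List.mem_cons_self ..)
    have ha0le := sorted_head_le ks a0 t hs
    have hmin_head : ∀ m, PySem.List.min? ks (fun k => k) = some m → m = a0 := by
      intro m hm
      exact le_antisymm (PySem.List.min?_isMin hm a0 ha0mem)
        (ha0le m (PySem.List.min?_mem hm))
    by_cases hlt : size < a0
    · have hsm : ks.filter (fun k => decide (k < size)) = [] := by
        rw [List.filter_eq_nil_iff]
        intro k hk
        simpa using not_lt.2 (le_trans (le_of_lt hlt) (ha0le k hk))
      simp only [hlt, if_true, hsm, ne_eq, not_true_eq_false, if_false]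
      cases hmin : PySem.List.min? ks (fun k => k) with
      | none => exact absurd ((PySem.List.min?_eq_none_iff _ _).1 hmin) hksne
      | some m => rw [hmin_head m hmin]
    · simp only [hlt, if_false]
      cases hf : (a0 :: t).reverse.find? (fun k => decide (k < size)) with
      | none =>
        have hnone : ∀ k ∈ ks, ¬ (k < size) := by
          intro k hk hklt
          have hkrev : k ∈ (a0 :: t).reverse :=
            List.mem_reverse.2 (hperm.mem_iff.2 hk)
          have := List.find?_eq_none.1 hf k hkrev
          simp [hklt] at this
        have hsm : ks.filter (fun k => decide (k < size)) = [] := by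
          rw [List.filter_eq_nil_iff]
          intro k hk
          simpa using hnone k hk
        simp only [hsm, ne_eq, not_true_eq_false, if_false]
        cases hmin : PySem.List.min? ks (fun k => k) with
        | none => exact absurd ((PySem.List.min?_eq_none_iff _ _).1 hmin) hksne
        | some m => rw [hmin_head m hmin]
      | some r =>
        have hrmem : r ∈ ks := hperm.mem_iff.1 (List.mem_reverse.1 (List.mem_of_find?_eq_some hf))
        have hrlt : r < size := by simpa using List.find?_some hf
        have hrsm : r ∈ ks.filter (fun k => decide (k < size)) :=
          List.mem_filter.2 ⟨hrmem, by simpa using hrlt⟩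
        have hsmne : ks.filter (fun k => decide (k < size)) ≠ [] :=
          List.ne_nil_of_mem hrsm
        simp only [ne_eq, hsmne, not_false_eq_true, if_true]
        cases hmax : PySem.List.max? (ks.filter (fun k => decide (k < size))) (fun k => k) with
        | none => exact absurd ((PySem.List.max?_eq_none_iff _ _).1 hmax) hsmne
        | some M =>
          have hMsm := PySem.List.max?_mem hmax
          have hMmem : M ∈ ks := (List.mem_filter.1 hMsm).1
          have hMlt : M < size := by simpa using (List.mem_filter.1 hMsm).2
          have hrev_pw : ((a0 :: t).reverse).Pairwise (fun a b => b ≤ a) := by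
            rw [List.pairwise_reverse]
            have := PySem.List.sorted_pairwise ks (fun k => k)
            rw [hs] at this
            exact this
          have hMler : M ≤ r := find_lt_is_max _ hrev_pw size r hf M
            (List.mem_reverse.2 (hperm.mem_iff.2 hMmem)) hMlt
          have hrleM : r ≤ M := PySem.List.max?_isMax hmax r hrsm
          rw [le_antisymm hrleM hMler]

-- ===== VERDICT (by name: the statement is the Claim_ definition above) =====
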